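-- pv_equiv track=rewrite | github.com/haixiangyan/leetcode-python | Microsoft 2020 春招OA 真题/1821. Min Deletions To Obtain String in Right Format.py | minDeletionsToObtainStringInRightFormat
-- ===== SOURCE A (Python) =====
-- def minDeletionsToObtainStringInRightFormat(s):
--     rhs = lhs = 0
--
--     for i in range(len(s)):
--         if s[i] == 'A':
--             rhs += 1
--
--     result = rhs
--
--     for i in range(len(s)):
--         if s[i] == 'A':
--             rhs -= 1
--         else:
--             lhs += 1
--         result = min(result, rhs + lhs)
--     return result
-- ===== SOURCE B (Python) =====
-- def minDeletionsToObtainStringInRightFormat(s):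
--     delete = 0
--     b_count = 0
--     for c in s:
--         if c == 'A':
--             delete = min(delete + 1, b_count)
--         else:
--             b_count += 1
--     return delete
-- ===== Notes on version B (the rewrite author's own statement) =====
-- stated objective: faster
-- what changed: Replaces the two-pass precount-then-prefix-min strategy (tracking remaining letter-A count, seen-B count and a running minimum over every prefix) with a single-pass greedy DP over two accumulators using the recurrence delete = min(delete+1, b_count) applied at each letter-A character.
import Mathlib
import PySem

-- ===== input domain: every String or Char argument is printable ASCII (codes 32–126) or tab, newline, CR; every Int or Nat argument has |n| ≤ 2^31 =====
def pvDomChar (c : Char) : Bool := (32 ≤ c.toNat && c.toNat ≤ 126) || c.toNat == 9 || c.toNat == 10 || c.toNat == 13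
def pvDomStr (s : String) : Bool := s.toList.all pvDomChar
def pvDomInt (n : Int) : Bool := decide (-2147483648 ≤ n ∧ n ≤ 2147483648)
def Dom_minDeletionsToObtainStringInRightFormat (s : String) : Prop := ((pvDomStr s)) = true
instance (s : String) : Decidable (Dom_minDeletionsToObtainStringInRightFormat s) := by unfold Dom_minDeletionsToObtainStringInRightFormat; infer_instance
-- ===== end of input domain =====

-- B replaces A's two-pass precount-then-prefix-min with a simpler single-pass greedy DP (same O(n) cost).


-- ===== PORT A =====
-- first loop of A: count the 'A' characters
def pvCountA : List Char → Int
  | [] => 0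
  | c :: t => (if c = 'A' then 1 else 0) + pvCountA t

-- second loop of A: state (rhs, lhs, result), result = min(result, rhs+lhs) each step
def pvALoop : List Char → Int → Int → Int → Int
  | [], _, _, result => result
  | c :: t, rhs, lhs, result =>
    if c = 'A' then pvALoop t (rhs - 1) lhs (min result ((rhs - 1) + lhs))
    else pvALoop t rhs (lhs + 1) (min result (rhs + (lhs + 1)))

def minDeletionsToObtainStringInRightFormat (s : String) : Int :=
  pvALoop s.toList (pvCountA s.toList) 0 (pvCountA s.toList)

-- ===== PORT B =====
-- single pass: state (delete, b_count)
def pvBLoop : List Char → Int → Int → Int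
  | [], delete, _ => delete
  | c :: t, delete, bcount =>
    if c = 'A' then pvBLoop t (min (delete + 1) bcount) bcount
    else pvBLoop t delete (bcount + 1)

def minDeletionsToObtainStringInRightFormat_alt (s : String) : Int :=
  pvBLoop s.toList 0 0

-- ===== PRECONDITION & SPEC =====
def Spec_minDeletionsToObtainStringInRightFormat (s : String) (out : Int) : Prop := out = minDeletionsToObtainStringInRightFormat_alt s
instance (s : String) (out : Int) : Decidable (Spec_minDeletionsToObtainStringInRightFormat s out) := by unfold Spec_minDeletionsToObtainStringInRightFormat; infer_instance

-- ===== CLAIM (what is proved, stated in full; the proofs are below) =====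
def Claim_equal_minDeletionsToObtainStringInRightFormat : Prop := ∀ (s : String), Dom_minDeletionsToObtainStringInRightFormat s → Spec_minDeletionsToObtainStringInRightFormat s (minDeletionsToObtainStringInRightFormat s)

-- ===== LEMMAS AND PROOFS =====
-- Invariant: with rhs = count of remaining 'A's, A's loop started at result = d + rhs
-- computes the same value as B's loop started at (d, b), provided d ≤ b.
theorem pvLoop_eq (t : List Char) : ∀ d b : Int, d ≤ b →
    pvALoop t (pvCountA t) b (d + pvCountA t) = pvBLoop t d b := by
  induction t with
  | nil => intro d b _; simp [pvALoop, pvBLoop, pvCountA]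
  | cons c t ih =>
    intro d b hdb
    by_cases hc : c = 'A'
    · subst hc
      have h2 : pvCountA ('A' :: t) - 1 = pvCountA t := by simp [pvCountA]
      have h1 : min (d + pvCountA ('A' :: t)) (pvCountA ('A' :: t) - 1 + b)
          = min (d + 1) b + pvCountA t := by
        simp [pvCountA]; omega
      simp only [pvALoop, pvBLoop]
      rw [if_pos trivial, if_pos trivial, h1, h2]
      exact ih (min (d + 1) b) b (by omega)
    · have h2 : pvCountA (c :: t) = pvCountA t := by simp [pvCountA, hc]
      have h1 : min (d + pvCountA (c :: t)) (pvCountA (c :: t) + (b + 1))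
          = d + pvCountA t := by rw [h2]; omega
      simp only [pvALoop, pvBLoop]
      rw [if_neg hc, if_neg hc, h1, h2]
      exact ih d (b + 1) (by omega)

-- ===== VERDICT (by name: the statement is the Claim_ definition above) =====
theorem minDeletionsToObtainStringInRightFormat_spec : Claim_equal_minDeletionsToObtainStringInRightFormat := by
  intro s _
  unfold Spec_minDeletionsToObtainStringInRightFormat minDeletionsToObtainStringInRightFormat minDeletionsToObtainStringInRightFormat_alt
  have := pvLoop_eq s.toList 0 0 le_rfl
  simpa using this
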